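-- pv_equiv track=rewrite | github.com/MatrixManAtYrService/rhizome | src/rhizome/sync_schema.py | get_database_short_name
-- ===== SOURCE A (Python) =====
-- def get_database_short_name(environment_name: str) -> str:
--     """Extract database short name from environment name.
--
--     Examples:
--         DevBillingBookkeeper -> billing_bookkeeper
--         NorthAmericaBillingEvent -> billing_event
--         NorthAmericaBilling -> billing
--     """
--     # Remove common prefixes
--     name = environment_name.replace("NorthAmerica", "").replace("Dev", "").replace("Demo", "")
--
--     # Convert from PascalCase to snake_case
--     # Insert underscore before capital letters (except first)
--     result: list[str] = []
--     for i, char in enumerate(name):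
--         if i > 0 and char.isupper():
--             result.append("_")
--         result.append(char.lower())
--     return "".join(result)
-- ===== SOURCE B (Python) =====
-- def get_database_short_name(environment_name: str) -> str:
--     # Same prefix-strip chain, then two-phase: segment into words at uppercase
--     # boundaries, lowercase each word, and join with underscores.
--     name = environment_name.replace("NorthAmerica", "").replace("Dev", "").replace("Demo", "")
--     words = []
--     cur = ""
--     for ch in name:
--         if ch.isupper() and cur != "":
--             words.append(cur)
--             cur = ch
--         else:
--             cur += ch
--     if cur != "":
--         words.append(cur)
--     return "_".join(w.lower() for w in words)
-- ===== Notes on version B (the rewrite author's own statement) =====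
-- stated objective: alternative
-- what changed: Replaces the inline underscore-emitting per-character loop with a two-phase structure: segment the stripped name into words at uppercase boundaries, then lowercase each word and join with underscores.
import Mathlib
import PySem

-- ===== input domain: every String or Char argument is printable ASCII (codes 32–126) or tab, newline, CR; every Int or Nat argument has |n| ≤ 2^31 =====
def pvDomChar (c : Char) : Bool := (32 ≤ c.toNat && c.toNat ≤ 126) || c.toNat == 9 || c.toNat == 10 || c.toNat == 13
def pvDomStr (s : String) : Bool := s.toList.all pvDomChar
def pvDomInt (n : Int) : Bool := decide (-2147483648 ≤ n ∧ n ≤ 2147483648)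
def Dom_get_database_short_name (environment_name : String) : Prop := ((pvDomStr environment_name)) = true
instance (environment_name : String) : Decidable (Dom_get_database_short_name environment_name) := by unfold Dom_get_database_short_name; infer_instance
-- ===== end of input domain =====

-- B replaces A's inline underscore-emitting character loop with a segment-into-words-then-join structure (same cost).


-- ===== PORT A =====
def get_database_short_name (environment_name : String) : String :=
  let name := PySem.Str.replace (PySem.Str.replace (PySem.Str.replace environment_name "NorthAmerica" "") "Dev" "") "Demo" ""
  let result : List Char := (PySem.List.enumerate name.toList).foldl
    (fun acc p =>
      (if p.1 > 0 && PySem.Chars.isupper p.2 then acc ++ ['_'] else acc) ++ [PySem.Chars.lowerChar p.2])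
    []
  String.mk result

-- ===== PORT B =====
-- word segmentation: start a new word at each uppercase char unless the buffer is empty
def gdsnWords : List Char → List Char → List (List Char)
  | [], cur => if cur.isEmpty then [] else [cur]
  | c :: rest, cur =>
      if PySem.Chars.isupper c && !cur.isEmpty then cur :: gdsnWords rest [c]
      else gdsnWords rest (cur ++ [c])

def get_database_short_name_alt (environment_name : String) : String :=
  let name := PySem.Str.replace (PySem.Str.replace (PySem.Str.replace environment_name "NorthAmerica" "") "Dev" "") "Demo" ""
  String.mk (PySem.Chars.join ['_'] ((gdsnWords name.toList []).map PySem.Chars.lower))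

-- ===== PRECONDITION & SPEC =====
def Spec_get_database_short_name (environment_name : String) (out : String) : Prop := out = get_database_short_name_alt environment_name
instance (environment_name : String) (out : String) : Decidable (Spec_get_database_short_name environment_name out) := by unfold Spec_get_database_short_name; infer_instance

-- ===== CLAIM (what is proved, stated in full; the proofs are below) =====
def Claim_equal_get_database_short_name : Prop := ∀ (environment_name : String), Dom_get_database_short_name environment_name → Spec_get_database_short_name environment_name (get_database_short_name environment_name)

-- ===== LEMMAS AND PROOFS =====

-- per-character contribution of A's loop, index > 0
def gdsnPiece (c : Char) : List Char :=
  if PySem.Chars.isupper c then ['_', PySem.Chars.lowerChar c] else [PySem.Chars.lowerChar c]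

theorem gdsnWords_ne_nil (cs cur : List Char) (h : cur ≠ []) : gdsnWords cs cur ≠ [] := by
  induction cs generalizing cur with
  | nil => simp [gdsnWords, List.isEmpty_iff, h]
  | cons c rest ih =>
    simp only [gdsnWords]
    split
    · simp
    · exact ih _ (by simp)

theorem gdsn_foldl (cs : List Char) (n : Int) (hn : 0 < n) (acc : List Char) :
    (PySem.List.enumerate cs n).foldl
      (fun acc p =>
        (if p.1 > 0 && PySem.Chars.isupper p.2 then acc ++ ['_'] else acc) ++ [PySem.Chars.lowerChar p.2])
      acc = acc ++ cs.flatMap gdsnPiece := by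
  induction cs generalizing n acc with
  | nil => simp [PySem.List.enumerate]
  | cons c rest ih =>
    simp only [PySem.List.enumerate, List.foldl_cons]
    rw [ih (n + 1) (by omega)]
    simp only [gdsnPiece, List.flatMap_cons, decide_eq_true_eq, hn]
    by_cases hu : PySem.Chars.isupper c <;> simp [hu, hn]

theorem gdsn_join (cs cur : List Char) (h : cur ≠ []) :
    PySem.Chars.join ['_'] ((gdsnWords cs cur).map PySem.Chars.lower)
      = PySem.Chars.lower cur ++ cs.flatMap gdsnPiece := by
  induction cs generalizing cur with
  | nil => simp [gdsnWords, List.isEmpty_iff, h, PySem.Chars.join_singleton]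
  | cons c rest ih =>
    have hcur : (!cur.isEmpty) = true := by simp [h]
    simp only [gdsnWords]
    by_cases hu : PySem.Chars.isupper c
    · rw [if_pos (by simp [hu, hcur])]
      simp only [List.map_cons]
      obtain ⟨q, ws, hq⟩ : ∃ q ws, (gdsnWords rest [c]).map PySem.Chars.lower = q :: ws := by
        rcases hne : (gdsnWords rest [c]).map PySem.Chars.lower with _ | ⟨q, ws⟩
        · exact absurd (List.map_eq_nil_iff.mp hne) (gdsnWords_ne_nil rest [c] (by simp))
        · exact ⟨q, ws, rfl⟩
      rw [hq, PySem.Chars.join_cons_cons, ← hq, ih [c] (by simp)]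
      simp [gdsnPiece, hu, PySem.Chars.lower]
    · rw [if_neg (by simp [hu])]
      rw [ih (cur ++ [c]) (by simp)]
      simp [gdsnPiece, hu, PySem.Chars.lower]

-- ===== VERDICT (by name: the statement is the Claim_ definition above) =====
theorem get_database_short_name_spec : Claim_equal_get_database_short_name := by
  intro s _
  unfold Spec_get_database_short_name get_database_short_name get_database_short_name_alt
  set name := PySem.Str.replace (PySem.Str.replace (PySem.Str.replace s "NorthAmerica" "") "Dev" "") "Demo" "" with hname
  rcases hcs : name.toList with _ | ⟨c, rest⟩
  · simp [hcs, PySem.List.enumerate, gdsnWords, PySem.Chars.join_nil]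
  · simp only [hcs, PySem.List.enumerate, List.foldl_cons]
    rw [gdsn_foldl rest (0+1) (by omega)]
    have hB : gdsnWords (c :: rest) [] = gdsnWords rest [c] := by
      simp [gdsnWords]
    rw [hB, gdsn_join rest [c] (by simp)]
    simp [PySem.Chars.lower]
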